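-- pv_equiv track=rewrite | github.com/tchikichev/dtcd_gen_primitives | data/es/gen-new.py | indicator5
-- ===== SOURCE A (Python) =====
-- def indicator5(real):
--     indicator = []
--     res = real
--     for lim in [5,5,5,2]:
--         if res > lim:
--             indicator.append(lim)
--             res -= lim
--         else:
--             indicator.append(res)
--             return indicator
--     return indicator
-- ===== SOURCE B (Python) =====
-- def indicator5(real):
--     if real <= 5:
--         return [real]
--     if real <= 10:
--         return [5, real - 5]
--     if real <= 15:
--         return [5, 5, real - 10]
--     if real <= 17:
--         return [5, 5, 5, real - 15]
--     return [5, 5, 5, 2]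
-- ===== Notes on version B (the rewrite author's own statement) =====
-- stated objective: simpler
-- what changed: Replaced the subtract-and-append loop with a direct closed-form branch on the value of real against fixed cumulative thresholds, returning each segment list as a literal.
import Mathlib
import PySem

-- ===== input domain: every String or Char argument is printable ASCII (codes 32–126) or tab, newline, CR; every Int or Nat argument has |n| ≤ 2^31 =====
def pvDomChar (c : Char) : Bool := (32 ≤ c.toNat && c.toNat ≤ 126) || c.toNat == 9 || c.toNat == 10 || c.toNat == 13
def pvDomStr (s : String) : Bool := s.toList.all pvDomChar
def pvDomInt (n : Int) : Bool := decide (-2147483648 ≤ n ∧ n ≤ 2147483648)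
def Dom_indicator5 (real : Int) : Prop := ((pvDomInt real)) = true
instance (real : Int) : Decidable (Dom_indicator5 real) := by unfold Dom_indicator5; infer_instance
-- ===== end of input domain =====

-- B replaces A's subtract-and-append loop by a closed-form branch on cumulative thresholds (objective: simpler).


-- ===== PORT A =====
-- loop over [5,5,5,2] with early return: acc is the list built so far, res the remainder
def indicator5_go (res : Int) (acc : List Int) : List Int → List Int
  | [] => acc
  | lim :: rest =>
      if res > lim then indicator5_go (res - lim) (acc ++ [lim]) rest
      else acc ++ [res]

def indicator5 (real : Int) : List Int :=
  indicator5_go real [] [5, 5, 5, 2]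

-- ===== PORT B =====
def indicator5_alt (real : Int) : List Int :=
  if real ≤ 5 then [real]
  else if real ≤ 10 then [5, real - 5]
  else if real ≤ 15 then [5, 5, real - 10]
  else if real ≤ 17 then [5, 5, 5, real - 15]
  else [5, 5, 5, 2]

-- ===== PRECONDITION & SPEC =====
def Spec_indicator5 (real : Int) (out : List Int) : Prop := out = indicator5_alt real
instance (real : Int) (out : List Int) : Decidable (Spec_indicator5 real out) := by unfold Spec_indicator5; infer_instance

-- ===== CLAIM (what is proved, stated in full; the proofs are below) =====
def Claim_equal_indicator5 : Prop := ∀ (real : Int), Dom_indicator5 real → Spec_indicator5 real (indicator5 real)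

-- ===== LEMMAS AND PROOFS =====

-- ===== VERDICT (by name: the statement is the Claim_ definition above) =====
theorem indicator5_spec : Claim_equal_indicator5 := by
  intro real _
  unfold Spec_indicator5 indicator5 indicator5_alt
  simp only [indicator5_go]
  split_ifs <;> simp_all <;> omega
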